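-- pv_equiv track=rewrite | github.com/theprogrammerknownasat/stable-diffusion-wizard | main.py | fix_settings
-- ===== SOURCE A (Python) =====
-- def fix_settings(settings):
--     paths = [None] * 7  # Initialize a list with 7 None elements
--     path_indices = {
--         "auto_path": 0,
--         "comfy_path": 1,
--         "invoke_path": 2,
--         "foocus_path": 3,
--         "kohya_path": 4,
--         "volta_path": 5,
--         "gpt_path": 6
--     }
--
--     for key, value in settings.items():
--         if "_path" in key:
--             index = path_indices.get(key)
--             if index is not None:
--                 paths[index] = value if value != '' else "null"
--
--     return paths
-- ===== SOURCE B (Python) =====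
-- PATH_KEYS = ["auto_path", "comfy_path", "invoke_path", "foocus_path",
--              "kohya_path", "volta_path", "gpt_path"]
--
--
-- def fix_settings(settings):
--     return [(settings[k] if settings[k] != '' else "null") if k in settings else None
--             for k in PATH_KEYS]
-- ===== Notes on version B (the rewrite author's own statement) =====
-- stated objective: idiomatic
-- what changed: B drives the output positions directly: a single list comprehension over the fixed ordered list of the 7 known path keys with a dict lookup per key, instead of A's preallocated None slots mutated while scanning settings.items() with a substring test and an index dict.
import Mathlib
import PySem

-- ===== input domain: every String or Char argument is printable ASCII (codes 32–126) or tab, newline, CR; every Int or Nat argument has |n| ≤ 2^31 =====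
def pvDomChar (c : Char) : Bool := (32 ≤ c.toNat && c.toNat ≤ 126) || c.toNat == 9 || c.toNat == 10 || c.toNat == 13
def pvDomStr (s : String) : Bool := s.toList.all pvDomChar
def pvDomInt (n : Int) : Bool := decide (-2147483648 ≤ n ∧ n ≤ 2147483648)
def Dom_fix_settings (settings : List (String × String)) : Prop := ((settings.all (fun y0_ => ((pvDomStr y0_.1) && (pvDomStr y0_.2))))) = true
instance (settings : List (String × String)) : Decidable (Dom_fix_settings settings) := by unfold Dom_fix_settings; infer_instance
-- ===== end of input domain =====

-- B builds the output by a single map over the fixed ordered list of the 7 known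
-- path keys (one first-match lookup per key), instead of A's preallocated
-- 7-slot list mutated while scanning the settings items.

-- ===== PORT A =====
-- the path_indices dict literal of A
def pvPathIndices : PySem.Dict String Nat :=
  PySem.Dict.ofList [("auto_path", 0), ("comfy_path", 1), ("invoke_path", 2),
                     ("foocus_path", 3), ("kohya_path", 4), ("volta_path", 5), ("gpt_path", 6)]

def fix_settings (settings : List (String × String)) : List (Option String) :=
  settings.foldl
    (fun paths kv =>
      if PySem.Str.isIn "_path" kv.1 then
        match PySem.Dict.get? pvPathIndices kv.1 with
        | some index => paths.set index (some (if kv.2 ≠ "" then kv.2 else "null"))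
        | none => paths
      else paths)
    (List.replicate 7 none)

-- ===== PORT B =====
def pvPathKeys : List String :=
  ["auto_path", "comfy_path", "invoke_path", "foocus_path", "kohya_path", "volta_path", "gpt_path"]

-- Python dict lookup on the association-list representation: first match
def pvLookup : List (String × String) → String → Option String
  | [], _ => none
  | (k, v) :: rest, key => if k = key then some v else pvLookup rest key

def fix_settings_alt (settings : List (String × String)) : List (Option String) :=
  pvPathKeys.map (fun k =>
    match pvLookup settings k with
    | some v => some (if v ≠ "" then v else "null")
    | none => none)

-- ===== PRECONDITION & SPEC =====
-- Pre_ requires pairwise-distinct keys: the Python argument is a dict, which cannot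
-- contain a duplicate key, so duplicate-key association lists represent no Python
-- input; on them A's last-wins overwrite vs B's first-match lookup is accidental.
def Pre_fix_settings (settings : List (String × String)) : Prop :=
  (settings.map Prod.fst).Nodup
instance (settings : List (String × String)) : Decidable (Pre_fix_settings settings) := by
  unfold Pre_fix_settings; infer_instance

def pvWitness_fix_settings : (List (String × String)) :=
  [("auto_path", ""), ("gpt_path", "g"), ("other", "x")]

def Spec_fix_settings (settings : List (String × String)) (out : List (Option String)) : Prop := out = fix_settings_alt settings
instance (settings : List (String × String)) (out : List (Option String)) : Decidable (Spec_fix_settings settings out) := by unfold Spec_fix_settings; infer_instance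

-- ===== CLAIM (what is proved, stated in full; the proofs are below) =====
def Claim_equal_fix_settings : Prop := ∀ (settings : List (String × String)), Dom_fix_settings settings → Pre_fix_settings settings → Spec_fix_settings settings (fix_settings settings)

-- ===== LEMMAS AND PROOFS =====

-- one result cell: first-match lookup of key k, defaulting to the accumulator cell p
def pvG (settings : List (String × String)) (k : String) (p : Option String) : Option String :=
  match pvLookup settings k with
  | some v => some (if v ≠ "" then v else "null")
  | none => p

theorem pvLookup_of_not_mem (l : List (String × String)) (k : String)
    (h : k ∉ l.map Prod.fst) : pvLookup l k = none := by
  induction l with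
  | nil => rfl
  | cons hd tl ih =>
    simp only [List.map_cons, List.mem_cons, not_or] at h
    simp [pvLookup, Ne.symm h.1, ih h.2]

theorem pvIdx_none (k : String) (h0 : k ≠ "auto_path") (h1 : k ≠ "comfy_path")
    (h2 : k ≠ "invoke_path") (h3 : k ≠ "foocus_path") (h4 : k ≠ "kohya_path")
    (h5 : k ≠ "volta_path") (h6 : k ≠ "gpt_path") :
    PySem.Dict.get? pvPathIndices k = none := by
  rw [show pvPathIndices = PySem.Dict.mk [("auto_path", 0), ("comfy_path", 1), ("invoke_path", 2),
    ("foocus_path", 3), ("kohya_path", 4), ("volta_path", 5), ("gpt_path", 6)] from by decide]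
  simp [PySem.Dict.get?_mk_cons, Ne.symm h0, Ne.symm h1, Ne.symm h2, Ne.symm h3,
    Ne.symm h4, Ne.symm h5, Ne.symm h6]
  rfl

theorem pv_main (settings : List (String × String))
    (hn : (settings.map Prod.fst).Nodup) :
    ∀ p0 p1 p2 p3 p4 p5 p6 : Option String,
    settings.foldl
      (fun paths kv =>
        if PySem.Str.isIn "_path" kv.1 then
          match PySem.Dict.get? pvPathIndices kv.1 with
          | some index => paths.set index (some (if kv.2 ≠ "" then kv.2 else "null"))
          | none => paths
        else paths)
      [p0, p1, p2, p3, p4, p5, p6]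
    = [pvG settings "auto_path" p0, pvG settings "comfy_path" p1,
       pvG settings "invoke_path" p2, pvG settings "foocus_path" p3,
       pvG settings "kohya_path" p4, pvG settings "volta_path" p5,
       pvG settings "gpt_path" p6] := by
  induction settings with
  | nil => intro p0 p1 p2 p3 p4 p5 p6; simp [pvG, pvLookup]
  | cons hd tl ih =>
    obtain ⟨k, v⟩ := hd
    simp only [List.map_cons, List.nodup_cons] at hn
    obtain ⟨hk, htl⟩ := hn
    have hnone := pvLookup_of_not_mem tl k hk
    intro p0 p1 p2 p3 p4 p5 p6
    rw [List.foldl_cons]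
    by_cases h0 : k = "auto_path"
    · subst h0
      simp only [show PySem.Str.isIn "_path" "auto_path" = true from by decide,
        show PySem.Dict.get? pvPathIndices "auto_path" = some 0 from by decide, if_true]
      rw [show ([p0, p1, p2, p3, p4, p5, p6].set 0 (some (if v ≠ "" then v else "null"))) = [some (if v ≠ "" then v else "null"), p1, p2, p3, p4, p5, p6] from rfl]
      rw [ih htl]
      simp [pvG, pvLookup, hnone]
    · by_cases h1 : k = "comfy_path"
      · subst h1
        simp only [show PySem.Str.isIn "_path" "comfy_path" = true from by decide,
          show PySem.Dict.get? pvPathIndices "comfy_path" = some 1 from by decide, if_true]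
        rw [show ([p0, p1, p2, p3, p4, p5, p6].set 1 (some (if v ≠ "" then v else "null"))) = [p0, some (if v ≠ "" then v else "null"), p2, p3, p4, p5, p6] from rfl]
        rw [ih htl]
        simp [pvG, pvLookup, hnone, h0]
      · by_cases h2 : k = "invoke_path"
        · subst h2
          simp only [show PySem.Str.isIn "_path" "invoke_path" = true from by decide,
            show PySem.Dict.get? pvPathIndices "invoke_path" = some 2 from by decide, if_true]
          rw [show ([p0, p1, p2, p3, p4, p5, p6].set 2 (some (if v ≠ "" then v else "null"))) = [p0, p1, some (if v ≠ "" then v else "null"), p3, p4, p5, p6] from rfl]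
          rw [ih htl]
          simp [pvG, pvLookup, hnone, h0, h1]
        · by_cases h3 : k = "foocus_path"
          · subst h3
            simp only [show PySem.Str.isIn "_path" "foocus_path" = true from by decide,
              show PySem.Dict.get? pvPathIndices "foocus_path" = some 3 from by decide, if_true]
            rw [show ([p0, p1, p2, p3, p4, p5, p6].set 3 (some (if v ≠ "" then v else "null"))) = [p0, p1, p2, some (if v ≠ "" then v else "null"), p4, p5, p6] from rfl]
            rw [ih htl]
            simp [pvG, pvLookup, hnone, h0, h1, h2]
          · by_cases h4 : k = "kohya_path"
            · subst h4
              simp only [show PySem.Str.isIn "_path" "kohya_path" = true from by decide,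
                show PySem.Dict.get? pvPathIndices "kohya_path" = some 4 from by decide, if_true]
              rw [show ([p0, p1, p2, p3, p4, p5, p6].set 4 (some (if v ≠ "" then v else "null"))) = [p0, p1, p2, p3, some (if v ≠ "" then v else "null"), p5, p6] from rfl]
              rw [ih htl]
              simp [pvG, pvLookup, hnone, h0, h1, h2, h3]
            · by_cases h5 : k = "volta_path"
              · subst h5
                simp only [show PySem.Str.isIn "_path" "volta_path" = true from by decide,
                  show PySem.Dict.get? pvPathIndices "volta_path" = some 5 from by decide, if_true]
                rw [show ([p0, p1, p2, p3, p4, p5, p6].set 5 (some (if v ≠ "" then v else "null"))) = [p0, p1, p2, p3, p4, some (if v ≠ "" then v else "null"), p6] from rfl]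
                rw [ih htl]
                simp [pvG, pvLookup, hnone, h0, h1, h2, h3, h4]
              · by_cases h6 : k = "gpt_path"
                · subst h6
                  simp only [show PySem.Str.isIn "_path" "gpt_path" = true from by decide,
                    show PySem.Dict.get? pvPathIndices "gpt_path" = some 6 from by decide, if_true]
                  rw [show ([p0, p1, p2, p3, p4, p5, p6].set 6 (some (if v ≠ "" then v else "null"))) = [p0, p1, p2, p3, p4, p5, some (if v ≠ "" then v else "null")] from rfl]
                  rw [ih htl]
                  simp [pvG, pvLookup, hnone, h0, h1, h2, h3, h4, h5]
                · have hidx : PySem.Dict.get? pvPathIndices k = none := pvIdx_none k h0 h1 h2 h3 h4 h5 h6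
                  have hstep : (if PySem.Str.isIn "_path" k then
                      match PySem.Dict.get? pvPathIndices k with
                      | some index => List.set [p0, p1, p2, p3, p4, p5, p6] index (some (if v ≠ "" then v else "null"))
                      | none => [p0, p1, p2, p3, p4, p5, p6]
                    else [p0, p1, p2, p3, p4, p5, p6]) = [p0, p1, p2, p3, p4, p5, p6] := by
                    rw [hidx]; split <;> rfl
                  rw [hstep, ih htl]
                  simp [pvG, pvLookup, h0, h1, h2, h3, h4, h5, h6]

-- ===== VERDICT (by name: the statement is the Claim_ definition above) =====
theorem fix_settings_spec : Claim_equal_fix_settings := by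
  intro settings _hd hpre
  unfold Spec_fix_settings fix_settings fix_settings_alt
  rw [show (List.replicate 7 (none : Option String)) = [none, none, none, none, none, none, none] from rfl]
  rw [pv_main settings hpre]
  simp [pvPathKeys, pvG]
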